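-- pv_equiv track=rewrite | github.com/joeott/legal-doc-processor | scripts/cli/deploy_rds_schema.py | _split_sql_sections
-- ===== SOURCE A (Python) =====
-- def _split_sql_sections(sql_script: str) -> list:
--     """Split SQL script into logical sections for progress tracking."""
--     sections = []
--     current_section = []
--     current_name = "Initialization"
--
--     for line in sql_script.split('\n'):
--         if line.strip().startswith('--') and any(
--             keyword in line for keyword in ['CORE TABLES', 'PROCESSING', 'CONTENT',
--             'ENTITY', 'RELATIONSHIP', 'MONITORING', 'AUDIT', 'VIEWS',
--             'FUNCTIONS', 'PERMISSIONS', 'INITIAL DATA']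
--         ):
--             if current_section:
--                 sections.append((current_name, '\n'.join(current_section)))
--             current_section = [line]
--             current_name = line.strip('- ').strip()
--         else:
--             current_section.append(line)
--
--     if current_section:
--         sections.append((current_name, '\n'.join(current_section)))
--
--     return sections
-- ===== SOURCE B (Python) =====
-- KEYWORDS = ['CORE TABLES', 'PROCESSING', 'CONTENT',
--             'ENTITY', 'RELATIONSHIP', 'MONITORING', 'AUDIT', 'VIEWS',
--             'FUNCTIONS', 'PERMISSIONS', 'INITIAL DATA']
--
--
-- def _is_header(line):
--     return line.strip().startswith('--') and any(k in line for k in KEYWORDS)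
--
--
-- def _span_nonheader(lines):
--     """Longest non-header prefix of lines, and the remainder."""
--     i = 0
--     while i < len(lines) and not _is_header(lines[i]):
--         i += 1
--     return lines[:i], lines[i:]
--
--
-- def _split_sql_sections(sql_script: str) -> list:
--     """Split SQL script into logical sections for progress tracking.
--
--     Staged span decomposition: first peel the non-header prefix (the
--     'Initialization' span, kept only if non-empty), then repeatedly peel
--     a header line together with its non-header body span."""
--     head, rest = _span_nonheader(sql_script.split('\n'))
--     sections = [("Initialization", '\n'.join(head))] if head else []
--     while rest:
--         hdr, tail = rest[0], rest[1:]
--         body, rest = _span_nonheader(tail)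
--         sections.append((hdr.strip('- ').strip(), '\n'.join([hdr] + body)))
--     return sections
-- ===== Notes on version B (the rewrite author's own statement) =====
-- stated objective: alternative
-- what changed: B replaces A's single forward loop with mutable accumulator-and-flush state by a staged span decomposition: it first peels the longest non-header prefix as the 'Initialization' section, then repeatedly peels a header line plus its following non-header span as one section.
import Mathlib
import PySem

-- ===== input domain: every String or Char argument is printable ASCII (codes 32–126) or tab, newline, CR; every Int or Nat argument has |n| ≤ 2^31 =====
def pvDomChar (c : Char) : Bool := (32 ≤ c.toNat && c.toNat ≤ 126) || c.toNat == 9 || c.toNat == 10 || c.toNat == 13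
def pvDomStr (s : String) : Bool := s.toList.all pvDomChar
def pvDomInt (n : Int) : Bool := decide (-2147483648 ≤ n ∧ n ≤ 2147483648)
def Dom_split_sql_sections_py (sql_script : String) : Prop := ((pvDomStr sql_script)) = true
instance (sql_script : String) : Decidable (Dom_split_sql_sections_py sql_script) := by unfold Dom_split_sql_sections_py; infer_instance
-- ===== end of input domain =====

-- B replaces A's forward accumulator-with-flush loop with a staged span decomposition
-- (peel the non-header prefix, then repeatedly peel a header plus its body span);
-- objective: alternative, same cost.

-- ===== PORT A =====
def pvKeywords : List String :=
  ["CORE TABLES", "PROCESSING", "CONTENT", "ENTITY", "RELATIONSHIP", "MONITORING",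
   "AUDIT", "VIEWS", "FUNCTIONS", "PERMISSIONS", "INITIAL DATA"]

def pvIsHeader (line : String) : Bool :=
  PySem.Str.startswith (PySem.Str.strip line) "--" &&
    pvKeywords.any (fun k => PySem.Str.isIn k line)

def pvName (line : String) : String :=
  PySem.Str.strip (PySem.Str.stripChars line "- ")

def pvStepA (st : List (String × String) × List String × String) (line : String) :
    List (String × String) × List String × String :=
  let (sections, cur, name) := st
  if pvIsHeader line then
    ((if cur ≠ [] then sections ++ [(name, PySem.Str.join "\n" cur)] else sections),
     [line], pvName line)
  else
    (sections, cur ++ [line], name)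

def split_sql_sections_py (sql_script : String) : List (String × String) :=
  let st := ((PySem.Str.split? sql_script "\n").getD []).foldl pvStepA ([], [], "Initialization")
  let (sections, cur, name) := st
  if cur ≠ [] then sections ++ [(name, PySem.Str.join "\n" cur)] else sections

-- ===== PORT B =====
-- the index scan 'while i < len(lines) and not _is_header(lines[i])' transcribed as
-- structural recursion on the unscanned remainder (same tests, same order)
def pvSpanNH : List String → List String × List String
  | [] => ([], [])
  | l :: ls =>
      if pvIsHeader l then ([], l :: ls)
      else
        let (h, r) := pvSpanNH ls
        (l :: h, r)

lemma pvSpanNH_snd_len (L : List String) : (pvSpanNH L).2.length ≤ L.length := by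
  induction L with
  | nil => simp [pvSpanNH]
  | cons l ls ih =>
      simp only [pvSpanNH]
      split
      · simp
      · simpa using Nat.le_succ_of_le ih

-- the 'while rest:' loop of B, appending one section per peeled (header, body) span
def pvSectionsFrom : List String → List (String × String)
  | [] => []
  | h :: t =>
      (pvName h, PySem.Str.join "\n" (h :: (pvSpanNH t).1)) :: pvSectionsFrom (pvSpanNH t).2
  termination_by l => l.length
  decreasing_by
    simpa using Nat.lt_succ_of_le (pvSpanNH_snd_len t)

def split_sql_sections_py_alt (sql_script : String) : List (String × String) :=
  let (head, rest) := pvSpanNH ((PySem.Str.split? sql_script "\n").getD [])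
  (if head ≠ [] then [("Initialization", PySem.Str.join "\n" head)] else []) ++
    pvSectionsFrom rest

-- ===== PRECONDITION & SPEC =====
def Spec_split_sql_sections_py (sql_script : String) (out : List (String × String)) : Prop := out = split_sql_sections_py_alt sql_script
instance (sql_script : String) (out : List (String × String)) : Decidable (Spec_split_sql_sections_py sql_script out) := by unfold Spec_split_sql_sections_py; infer_instance

-- ===== CLAIM (what is proved, stated in full; the proofs are below) =====
def Claim_equal_split_sql_sections_py : Prop := ∀ (sql_script : String), Dom_split_sql_sections_py sql_script → Spec_split_sql_sections_py sql_script (split_sql_sections_py sql_script)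

-- ===== LEMMAS AND PROOFS =====

-- A's run from state (cur, name) over L, flushed at the end, without the sections prefix
def pvProcA : List String → List String → String → List (String × String)
  | [], cur, name => if cur ≠ [] then [(name, PySem.Str.join "\n" cur)] else []
  | l :: ls, cur, name =>
      if pvIsHeader l then
        (if cur ≠ [] then [(name, PySem.Str.join "\n" cur)] else []) ++ pvProcA ls [l] (pvName l)
      else
        pvProcA ls (cur ++ [l]) name

def pvFlushA (st : List (String × String) × List String × String) : List (String × String) :=
  if st.2.1 ≠ [] then st.1 ++ [(st.2.2, PySem.Str.join "\n" st.2.1)] else st.1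

lemma foldA_eq_procA (L : List String) :
    ∀ (secs : List (String × String)) (cur : List String) (name : String),
      pvFlushA (L.foldl pvStepA (secs, cur, name)) = secs ++ pvProcA L cur name := by
  induction L with
  | nil =>
      intro secs cur name
      simp only [List.foldl_nil, pvFlushA, pvProcA]
      split_ifs <;> simp
  | cons l ls ih =>
      intro secs cur name
      simp only [List.foldl_cons, pvStepA, pvProcA]
      by_cases h : pvIsHeader l = true
      · simp only [h, if_pos]
        rw [ih]
        split_ifs <;> simp
      · simp only [h, if_neg, Bool.false_eq_true, not_false_iff]
        rw [ih]

lemma procA_eq_spans (L : List String) :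
    ∀ (cur : List String) (name : String),
      pvProcA L cur name =
        (if cur ++ (pvSpanNH L).1 ≠ [] then
          [(name, PySem.Str.join "\n" (cur ++ (pvSpanNH L).1))] else []) ++
          pvSectionsFrom (pvSpanNH L).2 := by
  induction L with
  | nil =>
      intro cur name
      simp [pvProcA, pvSpanNH, pvSectionsFrom]
  | cons l ls ih =>
      intro cur name
      by_cases h : pvIsHeader l = true
      · simp only [pvProcA, pvSpanNH, h, if_pos]
        rw [ih [l] (pvName l)]
        simp [pvSectionsFrom]
      · simp only [pvProcA, pvSpanNH, h, Bool.false_eq_true, if_neg, not_false_iff]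
        rw [ih (cur ++ [l]) name]
        rcases hs : pvSpanNH ls with ⟨hh, rr⟩
        simp [List.append_assoc]

-- ===== VERDICT (by name: the statement is the Claim_ definition above) =====
theorem split_sql_sections_py_spec : Claim_equal_split_sql_sections_py := by
  intro s _
  show split_sql_sections_py s = split_sql_sections_py_alt s
  have hA : split_sql_sections_py s =
      pvFlushA (((PySem.Str.split? s "\n").getD []).foldl pvStepA ([], [], "Initialization")) := rfl
  rw [hA, foldA_eq_procA, List.nil_append, procA_eq_spans]
  rcases h : pvSpanNH ((PySem.Str.split? s "\n").getD []) with ⟨hh, rr⟩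
  simp [split_sql_sections_py_alt, h]
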